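-- pv_equiv track=rewrite | github.com/oliviernguyenquoc/advent-of-code | 2025/day6/day6.py | part2
-- ===== SOURCE A (Python) =====
-- import math
--
-- def _to_str_list(inst):
--     return [nb_str for nb_str in inst.strip().split(" ") if nb_str != ""]
--
-- def part2(instruction_list) -> int:
--     MAX_X, MAX_Y = len(instruction_list[0]), len(instruction_list)
--
--     nb_list = []
--     tmp_list = []
--     for x in range(MAX_X):
--         res_str = ""
--         for y in range(MAX_Y - 1):
--             if instruction_list[y][x] != "":
--                 res_str += instruction_list[y][x].strip()
--         if res_str == "":
--             nb_list.append(tmp_list)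
--             tmp_list = []
--         else:
--             tmp_list.append(int(res_str))
--
--     nb_list.append(tmp_list)
--     operations = _to_str_list(instruction_list[MAX_Y - 1])
--
--     total = 0
--     for i, op in enumerate(operations):
--         match op:
--             case "*":
--                 total += math.prod(nb_list[i])
--
--             case "+":
--                 total += sum(nb_list[i])
--     return total
-- ===== SOURCE B (Python) =====
-- def part2(instruction_list) -> int:
--     *body, op_row = instruction_list
--     width = len(instruction_list[0])
--     # row-major pass: grow every column's digit string one row at a time
--     bufs = [""] * width
--     for row in body:
--         bufs = [bufs[x] + row[x].strip() for x in range(width)]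
--     ops = [t for t in op_row.strip().split(" ") if t]
--     # single streaming pass: reduce each group on the fly with its operator,
--     # never materialising group lists; a sentinel blank closes the last group
--     total = 0
--     g = 0            # index of the current group / operator token
--     acc = None       # running reduction of the current group, None = empty so far
--     for col in bufs + [""]:
--         if col:
--             v = int(col)
--             if acc is None:
--                 acc = v
--             elif g < len(ops) and ops[g] == "*":
--                 acc *= v
--             else:
--                 acc += v
--         else:
--             if g < len(ops) and ops[g] in ("*", "+"):
--                 total += acc if acc is not None else (1 if ops[g] == "*" else 0)
--             g += 1
--             acc = None
--     return total
-- ===== Notes on version B (the rewrite author's own statement) =====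
-- stated objective: alternative
-- what changed: A scans column-major (x outer, y inner) materialising explicit group lists of ints and then sums prod/sum by enumerate index into that list; B traverses the grid row-major growing all column strings simultaneously, then does one streaming pass over the columns with an operator pointer and a running Option accumulator that folds each group with its own operator on the fly (a sentinel blank closes the last group), never building group lists.
import Mathlib
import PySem

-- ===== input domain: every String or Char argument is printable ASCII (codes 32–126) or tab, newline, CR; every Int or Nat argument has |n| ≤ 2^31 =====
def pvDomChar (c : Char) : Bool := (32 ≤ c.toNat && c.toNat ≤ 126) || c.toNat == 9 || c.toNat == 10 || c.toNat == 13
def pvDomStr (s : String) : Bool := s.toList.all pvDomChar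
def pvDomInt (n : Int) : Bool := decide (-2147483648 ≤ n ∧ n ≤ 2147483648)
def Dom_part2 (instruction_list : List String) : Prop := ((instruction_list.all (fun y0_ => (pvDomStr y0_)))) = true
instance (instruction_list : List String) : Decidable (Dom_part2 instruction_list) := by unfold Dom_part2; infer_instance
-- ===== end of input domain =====

-- Equivalence of two exact implementations: A scans column-major and builds explicit group
-- lists, then indexes them by operator position; B scans row-major growing all column strings
-- at once and reduces each group on the fly in one streaming pass with an operator pointer.

-- inst.strip().split(" ") with empty tokens dropped (identical token parsing in both Pythons)
def toStrList (s : List Char) : List (List Char) :=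
  (PySem.Chars.splitOn (PySem.Chars.strip s) [' ']).filter (fun t => t != [])

-- ===== PORT A =====
def part2 (instruction_list : List String) : Int :=
  let rows := instruction_list.map String.toList
  let MAXX := (rows.getD 0 []).length
  let MAXY := rows.length
  let st := (List.range MAXX).foldl
    (fun (st : List (List Int) × List Int) x =>
      let resStr := (List.range (MAXY - 1)).foldl
        (fun acc y =>
          if ([(rows.getD y []).getD x ' '] : List Char) ≠ [] then
            acc ++ PySem.Chars.strip [(rows.getD y []).getD x ' ']
          else acc) []
      if resStr = [] then (st.1 ++ [st.2], ([] : List Int))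
      else (st.1, st.2 ++ [(PySem.Int.ofChars? resStr).getD 0]))
    (([], []) : List (List Int) × List Int)
  let nbList := st.1 ++ [st.2]
  let operations := toStrList (rows.getD (MAXY - 1) [])
  (PySem.List.enumerate operations 0).foldl
    (fun total p =>
      if p.2 = ['*'] then total + (nbList.getD p.1.toNat []).prod
      else if p.2 = ['+'] then total + (nbList.getD p.1.toNat []).sum
      else total) 0

-- ===== PORT B =====
-- the loop body of B's streaming pass over the column strings (state: total, group index, running acc)
def streamStep (ops : List (List Char)) (st : Int × Nat × Option Int) (col : List Char) :
    Int × Nat × Option Int :=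
  if col ≠ [] then
    let v := (PySem.Int.ofChars? col).getD 0
    match st.2.2 with
    | none => (st.1, st.2.1, some v)
    | some a =>
      if st.2.1 < ops.length ∧ ops.getD st.2.1 [] = ['*'] then (st.1, st.2.1, some (a * v))
      else (st.1, st.2.1, some (a + v))
  else
    ((if st.2.1 < ops.length ∧ (ops.getD st.2.1 [] = ['*'] ∨ ops.getD st.2.1 [] = ['+']) then
        st.1 + (match st.2.2 with
          | some a => a
          | none => if ops.getD st.2.1 [] = ['*'] then 1 else 0)
      else st.1), st.2.1 + 1, none)

def part2_alt (instruction_list : List String) : Int :=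
  let rows := instruction_list.map String.toList
  let body := rows.dropLast
  let opRow := rows.getLastD []
  let width := (rows.getD 0 []).length
  let bufs := body.foldl
    (fun (bufs : List (List Char)) row =>
      (List.range width).map (fun x => bufs.getD x [] ++ PySem.Chars.strip [row.getD x ' ']))
    (List.replicate width [])
  let ops := toStrList opRow
  ((bufs ++ [[]]).foldl (streamStep ops) (0, 0, none)).1

-- ===== PRECONDITION & SPEC =====
-- the column string at x of the given rows (used only to state Pre_ and in the proofs)
def colChars (rows : List (List Char)) (x : Nat) : List Char :=
  rows.flatMap (fun r => PySem.Chars.strip [r.getD x ' '])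

-- Pre_ = exactly the inputs where Python A returns: a nonempty list, every non-last row long
-- enough for every column of row 0 (else IndexError), every nonempty column string a valid
-- int() literal (else ValueError), and every '*'/'+' operator's index inside the group list
-- (else IndexError).
def Pre_part2 (instruction_list : List String) : Prop :=
  let rows := instruction_list.map String.toList
  let MAXX := (rows.getD 0 []).length
  let body := rows.take (rows.length - 1)
  instruction_list ≠ [] ∧
  (∀ r ∈ body, MAXX ≤ r.length) ∧
  (∀ x < MAXX, colChars body x ≠ [] → (PySem.Int.ofChars? (colChars body x)).isSome = true) ∧
  (∀ i < (toStrList (rows.getD (rows.length - 1) [])).length,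
     ((toStrList (rows.getD (rows.length - 1) [])).getD i [] = ['*'] ∨
      (toStrList (rows.getD (rows.length - 1) [])).getD i [] = ['+']) →
     i < (List.range MAXX).countP (fun x => colChars body x == []) + 1)
instance (instruction_list : List String) : Decidable (Pre_part2 instruction_list) := by
  unfold Pre_part2; infer_instance
def pvWitness_part2 : List String := ["12", "34", "+ "]
def Spec_part2 (instruction_list : List String) (out : Int) : Prop := out = part2_alt instruction_list
instance (instruction_list : List String) (out : Int) : Decidable (Spec_part2 instruction_list out) := by unfold Spec_part2; infer_instance

-- ===== CLAIM (what is proved, stated in full; the proofs are below) =====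
def Claim_equal_part2 : Prop := ∀ (instruction_list : List String), Dom_part2 instruction_list → Pre_part2 instruction_list → Spec_part2 instruction_list (part2 instruction_list)

-- ===== LEMMAS AND PROOFS =====

-- value B adds when a group closes / B's per-value reduction / unrolled stream total /
-- contribution of one group merged with a pending accumulator / sum of group contributions
def contribClose (ops : List (List Char)) (g : Nat) (acc : Option Int) : Int :=
  if g < ops.length ∧ (ops.getD g [] = ['*'] ∨ ops.getD g [] = ['+']) then
    (match acc with
     | some a => a
     | none => if ops.getD g [] = ['*'] then 1 else 0)
  else 0

def reduceStep (ops : List (List Char)) (g : Nat) (acc : Option Int) (v : Int) : Option Int :=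
  match acc with
  | none => some v
  | some a => if g < ops.length ∧ ops.getD g [] = ['*'] then some (a * v) else some (a + v)

def closeAll (ops : List (List Char)) : List (List Char) → Nat → Option Int → Int
  | [], g, acc => contribClose ops g acc
  | c :: cs, g, acc =>
    if c ≠ [] then closeAll ops cs g (reduceStep ops g acc ((PySem.Int.ofChars? c).getD 0))
    else contribClose ops g acc + closeAll ops cs (g + 1) none

def contrib2 (ops : List (List Char)) (g : Nat) (acc : Option Int) (grp : List Int) : Int :=
  if g < ops.length then
    (if ops.getD g [] = ['*'] then (acc.getD 1) * grp.prod
     else if ops.getD g [] = ['+'] then (acc.getD 0) + grp.sum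
     else 0)
  else 0

def sumTail (ops : List (List Char)) : Nat → List (List Int) → Int
  | _, [] => 0
  | g, G :: Gs => contrib2 ops g none G + sumTail ops (g + 1) Gs

def pushLast (gs : List (List Int)) (v : Int) : List (List Int) :=
  gs.dropLast ++ [gs.getLastD [] ++ [v]]

lemma pushLast_ne_nil (gs : List (List Int)) (v : Int) : pushLast gs v ≠ [] := by
  simp [pushLast]

def groupsR : List (List Char) → List (List Int)
  | [] => [[]]
  | c :: cs =>
    if c = [] then [] :: groupsR cs
    else
      match groupsR cs with
      | [] => [[(PySem.Int.ofChars? c).getD 0]]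
      | g0 :: gs => ((PySem.Int.ofChars? c).getD 0 :: g0) :: gs

lemma groupsR_ne_nil (cols : List (List Char)) : groupsR cols ≠ [] := by
  induction cols with
  | nil => simp [groupsR]
  | cons c cs ih =>
    unfold groupsR
    by_cases hc : c = []
    · simp [hc]
    · simp only [if_neg hc]
      cases h : groupsR cs <;> simp

lemma groupsR_nil_cons (cs : List (List Char)) : groupsR ([] :: cs) = [] :: groupsR cs := by
  rw [groupsR.eq_def]; simp

lemma groupsR_cons_ne (c : List Char) (cs : List (List Char)) (hc : c ≠ []) :
    groupsR (c :: cs)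
      = ((PySem.Int.ofChars? c).getD 0 :: (groupsR cs).headD []) :: (groupsR cs).tail := by
  cases h : groupsR cs with
  | nil => exact absurd h (groupsR_ne_nil cs)
  | cons g0 gs =>
    rw [groupsR.eq_def]
    simp [hc, h]

-- (range n).map (getD . d) names the first n elements
lemma range_map_getD {α : Type} (l : List α) (n : Nat) (h : n ≤ l.length) (d : α) :
    (List.range n).map (fun y => l.getD y d) = l.take n := by
  apply List.ext_getElem
  · simp; omega
  · intro i h1 h2
    simp only [List.getElem_map, List.getElem_range, List.getElem_take,
      List.getD_eq_getElem?_getD]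
    rw [List.getElem?_eq_getElem (by simp at h1; omega)]
    simp

-- A's inner per-column loop computes exactly the column string
lemma innerA (rows : List (List Char)) (x : Nat) :
    (List.range (rows.length - 1)).foldl
      (fun acc y =>
        if ([(rows.getD y []).getD x ' '] : List Char) ≠ [] then
          acc ++ PySem.Chars.strip [(rows.getD y []).getD x ' ']
        else acc) []
    = colChars (rows.take (rows.length - 1)) x := by
  simp only [ne_eq, List.cons_ne_nil, not_false_iff, if_true]
  rw [PySem.List.foldl_append_eq_flatMap]
  rw [← range_map_getD rows (rows.length - 1) (by omega) []]
  simp [colChars, List.flatMap_map]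

lemma dropLast_getLastD_cons {α : Type} (gs : List α) (d : α) (h : gs ≠ []) (t : List α) :
    gs.dropLast ++ gs.getLastD d :: t = gs ++ t := by
  have h1 : gs.dropLast ++ [gs.getLastD d] = gs := by
    cases gs with
    | nil => simp at h
    | cons a l =>
      rw [List.getLastD_eq_getLast?, List.getLast?_eq_some_getLast (l := a :: l) (by simp)]
      exact List.dropLast_concat_getLast (by simp)
  calc gs.dropLast ++ gs.getLastD d :: t = (gs.dropLast ++ [gs.getLastD d]) ++ t := by simp
    _ = gs ++ t := by rw [h1]


lemma foldl_push_groupsR (cols : List (List Char)) :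
    ∀ (gs : List (List Int)), gs ≠ [] →
    cols.foldl (fun gs c =>
        if c ≠ [] then pushLast gs ((PySem.Int.ofChars? c).getD 0)
        else gs ++ [[]]) gs
      = gs.dropLast ++ (gs.getLastD [] ++ (groupsR cols).headD []) :: (groupsR cols).tail := by
  induction cols with
  | nil =>
    intro gs h
    simp only [List.foldl_nil, groupsR, List.headD, List.tail]
    have := (dropLast_getLastD_cons gs [] h []).symm
    simpa using this
  | cons c cs ih =>
    intro gs h
    by_cases hc : c = []
    · subst hc
      rw [List.foldl_cons, if_neg (by simp), ih (gs ++ [[]]) (by simp), groupsR_nil_cons]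
      cases hg : groupsR cs with
      | nil => exact absurd hg (groupsR_ne_nil cs)
      | cons g0 gsr =>
        simp only [hg, List.headD_cons, List.tail_cons, List.dropLast_concat,
          List.getLastD_concat, List.nil_append, List.append_nil]
        exact (dropLast_getLastD_cons gs [] h _).symm
    · rw [List.foldl_cons, if_pos hc, ih (pushLast gs _) (by simp [pushLast]),
        groupsR_cons_ne c cs hc]
      simp only [pushLast, List.dropLast_concat, List.getLastD_concat, List.headD_cons,
        List.tail_cons]
      simp

-- the row-major buffer fold computes all column strings at once
lemma bufsEq (body : List (List Char)) (w : Nat) :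
    ∀ (f : Nat → List Char),
    body.foldl
      (fun (bufs : List (List Char)) row =>
        (List.range w).map (fun x => bufs.getD x [] ++ PySem.Chars.strip [row.getD x ' ']))
      ((List.range w).map f)
    = (List.range w).map (fun x => f x ++ colChars body x) := by
  induction body with
  | nil => intro f; simp [colChars]
  | cons r rs ih =>
    intro f
    rw [List.foldl_cons]
    have hmap : ((List.range w).map
        (fun x => ((List.range w).map f).getD x [] ++ PySem.Chars.strip [r.getD x ' ']))
        = (List.range w).map (fun x => f x ++ PySem.Chars.strip [r.getD x ' ']) := by
      apply List.map_congr_left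
      intro x hx
      rw [List.mem_range] at hx
      simp [List.getD_eq_getElem?_getD, List.getElem?_map, List.getElem?_range, hx]
    rw [hmap, ih (fun x => f x ++ PySem.Chars.strip [r.getD x ' '])]
    apply List.map_congr_left
    intro x _
    simp [colChars, List.flatMap_cons, List.append_assoc]

lemma streamStep_nil (ops : List (List Char)) (st : Int × Nat × Option Int) :
    streamStep ops st [] = (st.1 + contribClose ops st.2.1 st.2.2, st.2.1 + 1, none) := by
  rw [streamStep, if_neg (by simp)]
  unfold contribClose
  by_cases h : st.2.1 < ops.length ∧ (ops.getD st.2.1 [] = ['*'] ∨ ops.getD st.2.1 [] = ['+'])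
  · rw [if_pos h, if_pos h]
  · rw [if_neg h, if_neg h, add_zero]

lemma streamStep_cons (ops : List (List Char)) (st : Int × Nat × Option Int)
    (c : List Char) (hc : c ≠ []) :
    streamStep ops st c
      = (st.1, st.2.1, reduceStep ops st.2.1 st.2.2 ((PySem.Int.ofChars? c).getD 0)) := by
  rw [streamStep, if_pos hc]
  cases h : st.2.2 with
  | none => simp [reduceStep, h]
  | some a =>
    simp only [reduceStep, h]
    split_ifs <;> rfl

lemma streamEq (ops : List (List Char)) (cols : List (List Char)) :
    ∀ (t : Int) (g : Nat) (acc : Option Int),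
    ((cols ++ [[]]).foldl (streamStep ops) (t, g, acc)).1 = t + closeAll ops cols g acc := by
  induction cols with
  | nil =>
    intro t g acc
    rw [List.nil_append, List.foldl_cons, List.foldl_nil, streamStep_nil]
    simp [closeAll]
  | cons c cs ih =>
    intro t g acc
    by_cases hc : c = []
    · subst hc
      rw [List.cons_append, List.foldl_cons, streamStep_nil, ih]
      simp [closeAll, add_assoc]
    · rw [List.cons_append, List.foldl_cons, streamStep_cons ops _ c hc, ih]
      rw [closeAll, if_pos hc]

lemma contribClose_eq_contrib2 (ops : List (List Char)) (g : Nat) (acc : Option Int) :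
    contribClose ops g acc = contrib2 ops g acc [] := by
  unfold contribClose contrib2
  set o := ops.getD g [] with ho
  by_cases hg : g < ops.length
  · by_cases h1 : o = ['*']
    · rw [if_pos ⟨hg, Or.inl h1⟩, if_pos hg, if_pos h1]
      cases acc <;> simp [h1]
    · by_cases h2 : o = ['+']
      · rw [if_pos ⟨hg, Or.inr h2⟩, if_pos hg, if_neg h1, if_pos h2]
        cases acc <;> simp [h1]
      · rw [if_neg (by tauto), if_pos hg, if_neg h1, if_neg h2]
  · rw [if_neg (by tauto), if_neg hg]

lemma contrib2_reduce (ops : List (List Char)) (g : Nat) (acc : Option Int) (v : Int)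
    (G : List Int) :
    contrib2 ops g (reduceStep ops g acc v) G = contrib2 ops g acc (v :: G) := by
  unfold contrib2 reduceStep
  set o := ops.getD g [] with ho
  by_cases hg : g < ops.length
  · by_cases h1 : o = ['*']
    · cases acc <;>
        · rw [if_pos hg, if_pos hg, if_pos h1, if_pos h1]
          simp only [if_pos (And.intro hg h1), Option.getD_some, Option.getD_none,
            List.prod_cons]
          ring
    · cases acc <;>
        · rw [if_pos hg, if_pos hg, if_neg h1, if_neg h1]
          by_cases h2 : o = ['+']
          · simp only [if_neg (fun hh : _ ∧ _ => h1 hh.2), if_pos h2, Option.getD_some,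
              Option.getD_none, List.sum_cons]
            ring
          · simp only [if_neg h2]
  · cases acc <;> rw [if_neg hg, if_neg hg]

lemma closeAll_groups (ops : List (List Char)) (cols : List (List Char)) :
    ∀ (g : Nat) (acc : Option Int),
    closeAll ops cols g acc
      = contrib2 ops g acc ((groupsR cols).headD [])
        + sumTail ops (g + 1) (groupsR cols).tail := by
  induction cols with
  | nil =>
    intro g acc
    simp [closeAll, groupsR, sumTail, contribClose_eq_contrib2]
  | cons c cs ih =>
    intro g acc
    by_cases hc : c = []
    · subst hc
      rw [show closeAll ops ([] :: cs) g acc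
            = contribClose ops g acc + closeAll ops cs (g + 1) none from by
          rw [closeAll]; simp]
      rw [ih (g + 1) none, groupsR_nil_cons]
      rw [contribClose_eq_contrib2]
      cases hg : groupsR cs with
      | nil => exact absurd hg (groupsR_ne_nil cs)
      | cons g0 gsr =>
        simp [sumTail, add_assoc]
    · rw [show closeAll ops (c :: cs) g acc
            = closeAll ops cs g (reduceStep ops g acc ((PySem.Int.ofChars? c).getD 0)) from by
          rw [closeAll, if_pos hc]]
      rw [ih g _, groupsR_cons_ne c cs hc, contrib2_reduce]
      cases hg : groupsR cs with
      | nil => exact absurd hg (groupsR_ne_nil cs)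
      | cons g0 gsr => simp [hg]

lemma closeAll_sumTail (ops : List (List Char)) (cols : List (List Char)) :
    closeAll ops cols 0 none = sumTail ops 0 (groupsR cols) := by
  rw [closeAll_groups]
  cases hg : groupsR cols with
  | nil => exact absurd hg (groupsR_ne_nil cols)
  | cons g0 gsr => simp [sumTail, hg]

lemma sumTail_zip (ops : List (List Char)) (G : List (List Int)) :
    ∀ (g : Nat),
    sumTail ops g G
      = ((((ops.drop g).zip G).filter (fun p => p.1 == ['*'] || p.1 == ['+'])).map
          (fun p => if p.1 = ['*'] then p.2.prod else p.2.sum)).sum := by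
  induction G with
  | nil => intro g; simp [sumTail]
  | cons G0 Gs ih =>
    intro g
    by_cases hg : g < ops.length
    · rw [List.drop_eq_getElem_cons hg, List.zip_cons_cons]
      have hgd : ops[g] = ops.getD g [] := by
        rw [List.getD_eq_getElem?_getD, List.getElem?_eq_getElem hg]
        rfl
      rw [show sumTail ops g (G0 :: Gs) = contrib2 ops g none G0 + sumTail ops (g + 1) Gs
          from rfl]
      rw [ih (g + 1), List.filter_cons]
      unfold contrib2
      rw [if_pos hg, ← hgd]
      by_cases h1 : ops[g] = ['*']
      · simp [h1]
      · by_cases h2 : ops[g] = ['+']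
        · simp [h1, h2]
        · simp [h1, h2]
    · have hd : ops.drop g = [] := by rw [List.drop_eq_nil_iff]; omega
      have hd1 : ops.drop (g + 1) = [] := by rw [List.drop_eq_nil_iff]; omega
      rw [show sumTail ops g (G0 :: Gs) = contrib2 ops g none G0 + sumTail ops (g + 1) Gs
          from rfl]
      rw [ih (g + 1), hd, hd1]
      unfold contrib2
      rw [if_neg hg]
      simp

-- A's (finished groups, current group) accumulator vs append-to-last grouping
lemma groupInv (cols : List (List Char)) (nb : List (List Int)) (tmp : List Int) :
    (cols.foldl (fun (st : List (List Int) × List Int) c =>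
        if c = [] then (st.1 ++ [st.2], ([] : List Int))
        else (st.1, st.2 ++ [(PySem.Int.ofChars? c).getD 0])) (nb, tmp)).1
      ++ [(cols.foldl (fun (st : List (List Int) × List Int) c =>
        if c = [] then (st.1 ++ [st.2], ([] : List Int))
        else (st.1, st.2 ++ [(PySem.Int.ofChars? c).getD 0])) (nb, tmp)).2]
    = cols.foldl (fun gs c =>
        if c ≠ [] then pushLast gs ((PySem.Int.ofChars? c).getD 0)
        else gs ++ [[]]) (nb ++ [tmp]) := by
  induction cols generalizing nb tmp with
  | nil => simp
  | cons c rest ih =>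
    by_cases hc : c = []
    · rw [List.foldl_cons, List.foldl_cons, if_pos hc, if_neg (by simp [hc])]
      exact ih (nb ++ [tmp]) []
    · rw [List.foldl_cons, List.foldl_cons, if_neg hc, if_pos hc]
      rw [ih nb (tmp ++ [(PySem.Int.ofChars? c).getD 0])]
      congr 1
      simp [pushLast]

-- A's whole column loop produces the pushLast-folded group list
lemma groupBridge (n : Nat) (col : Nat → List Char) :
    ((List.range n).foldl (fun (st : List (List Int) × List Int) x =>
        if col x = [] then (st.1 ++ [st.2], ([] : List Int))
        else (st.1, st.2 ++ [(PySem.Int.ofChars? (col x)).getD 0])) ([], [])).1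
      ++ [((List.range n).foldl (fun (st : List (List Int) × List Int) x =>
        if col x = [] then (st.1 ++ [st.2], ([] : List Int))
        else (st.1, st.2 ++ [(PySem.Int.ofChars? (col x)).getD 0])) ([], [])).2]
    = ((List.range n).map col).foldl (fun gs c =>
        if c ≠ [] then pushLast gs ((PySem.Int.ofChars? c).getD 0)
        else gs ++ [[]]) [[]] := by
  have h := groupInv ((List.range n).map col) [] []
  simpa [List.foldl_map] using h

lemma pushLast_length (gs : List (List Int)) (v : Int) (h : gs ≠ []) :
    (pushLast gs v).length = gs.length := by
  have : 1 ≤ gs.length := List.length_pos_iff.mpr h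
  simp [pushLast]; omega

-- length of the group list: one group per empty column, plus the open one
lemma groupLen (cols : List (List Char)) (gs : List (List Int)) (h : gs ≠ []) :
    (cols.foldl (fun gs c =>
        if c ≠ [] then pushLast gs ((PySem.Int.ofChars? c).getD 0)
        else gs ++ [[]]) gs).length
      = gs.length + cols.countP (fun c => c == []) := by
  induction cols generalizing gs with
  | nil => simp
  | cons c rest ih =>
    by_cases hc : c = []
    · rw [List.foldl_cons, if_neg (by simp [hc])]
      rw [ih (gs ++ [[]]) (by simp)]
      simp [hc]
      omega
    · rw [List.foldl_cons, if_pos hc]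
      rw [ih _ (pushLast_ne_nil gs _), pushLast_length gs _ h]
      simp [hc]

-- A's enumerate-and-index summation vs the zip-filter-map summation
lemma sumEq (gs : List (List Int)) :
    ∀ (ops : List (List Char)) (k : Nat) (t : Int),
      (∀ i, i < ops.length → (ops.getD i [] = ['*'] ∨ ops.getD i [] = ['+']) → k + i < gs.length) →
      (PySem.List.enumerate ops (k : Int)).foldl
        (fun total p =>
          if p.2 = ['*'] then total + (gs.getD p.1.toNat []).prod
          else if p.2 = ['+'] then total + (gs.getD p.1.toNat []).sum
          else total) t
      = t + (((ops.zip (gs.drop k)).filter (fun p => p.1 == ['*'] || p.1 == ['+'])).map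
          (fun p => if p.1 = ['*'] then p.2.prod else p.2.sum)).sum := by
  intro ops
  induction ops with
  | nil => intro k t _; simp [PySem.List.enumerate_nil]
  | cons op rest ih =>
    intro k t hc
    rw [PySem.List.enumerate_cons]
    have hk1 : ((k : Int) + 1) = ((k + 1 : Nat) : Int) := by push_cast; ring
    have hrest : ∀ i, i < rest.length →
        (rest.getD i [] = ['*'] ∨ rest.getD i [] = ['+']) → (k + 1) + i < gs.length := by
      intro i hi hop
      have := hc (i + 1) (by simp; omega) (by simpa using hop)
      omega
    by_cases hm : op = ['*'] ∨ op = ['+']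
    · have hk : k < gs.length := by
        have := hc 0 (by simp) (by simpa using hm); omega
      rw [List.drop_eq_getElem_cons hk]
      simp only [List.foldl_cons, List.zip_cons_cons]
      rcases hm with h | h <;> subst h <;>
        · rw [hk1, ih (k + 1) _ hrest]
          simp [List.getElem?_eq_getElem hk]
          ring
    · obtain ⟨h1, h2⟩ := not_or.mp hm
      simp only [List.foldl_cons, if_neg h1, if_neg h2]
      rw [hk1, ih (k + 1) t hrest]
      by_cases hk : k < gs.length
      · rw [List.drop_eq_getElem_cons hk, List.zip_cons_cons, List.filter_cons]
        simp [h1, h2]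
      · have hd : gs.drop k = [] := by rw [List.drop_eq_nil_iff]; omega
        have hd1 : gs.drop (k + 1) = [] := by rw [List.drop_eq_nil_iff]; omega
        simp [hd, hd1]

lemma getLastD_eq_getD {α : Type} (l : List α) (d : α) (h : l ≠ []) :
    l.getLastD d = l.getD (l.length - 1) d := by
  cases l with
  | nil => simp at h
  | cons a t =>
    rw [List.getLastD_eq_getLast?, List.getLast?_eq_some_getLast (l := a :: t) (by simp)]
    rw [List.getD_eq_getElem?_getD, List.getElem?_eq_getElem (by simp)]
    simp [List.getLast_eq_getElem]

-- ===== VERDICT (by name: the statement is the Claim_ definition above) =====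
theorem part2_spec : Claim_equal_part2 := by
  intro l _ hpre
  obtain ⟨hne, hlen, hparse, hops⟩ := hpre
  show part2 l = part2_alt l
  have hrowsne : l.map String.toList ≠ [] := by simpa using hne
  simp only [part2, part2_alt]
  rw [List.dropLast_eq_take, getLastD_eq_getD _ _ hrowsne]
  -- name the shared pieces
  set rows := l.map String.toList with hrows
  set MAXX := (rows.getD 0 []).length with hMAXX
  set body := rows.take (rows.length - 1) with hbody
  set ops := toStrList (rows.getD (rows.length - 1) []) with hops'
  -- A's inner loop = the column strings
  have hstep : (fun (st : List (List Int) × List Int) x =>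
        let resStr := (List.range (rows.length - 1)).foldl
          (fun acc y =>
            if ([(rows.getD y []).getD x ' '] : List Char) ≠ [] then
              acc ++ PySem.Chars.strip [(rows.getD y []).getD x ' ']
            else acc) []
        if resStr = [] then (st.1 ++ [st.2], ([] : List Int))
        else (st.1, st.2 ++ [(PySem.Int.ofChars? resStr).getD 0]))
      = (fun (st : List (List Int) × List Int) x =>
        if colChars body x = []
        then (st.1 ++ [st.2], ([] : List Int))
        else (st.1, st.2 ++ [(PySem.Int.ofChars? (colChars body x)).getD 0])) := by
    funext st x
    rw [show ((List.range (rows.length - 1)).foldl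
          (fun acc y =>
            if ([(rows.getD y []).getD x ' '] : List Char) ≠ [] then
              acc ++ PySem.Chars.strip [(rows.getD y []).getD x ' ']
            else acc) [])
        = colChars body x from innerA rows x]
  rw [hstep, groupBridge MAXX (colChars body)]
  -- B's buffer fold = the same column strings
  have hrepl : List.replicate MAXX ([] : List Char) = (List.range MAXX).map (fun _ => []) := by
    simp [List.map_const']
  rw [hrepl, bufsEq body MAXX (fun _ => [])]
  have hcols : ((List.range MAXX).map (fun x => ([] : List Char) ++ colChars body x))
      = (List.range MAXX).map (colChars body) := by simp
  rw [hcols, streamEq ops ((List.range MAXX).map (colChars body)) 0 0 none, zero_add,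
    closeAll_sumTail, sumTail_zip]
  -- B's groupsR = A's pushLast-folded group list
  have hgroups : groupsR ((List.range MAXX).map (colChars body))
      = ((List.range MAXX).map (colChars body)).foldl (fun gs c =>
          if c ≠ [] then pushLast gs ((PySem.Int.ofChars? c).getD 0)
          else gs ++ [[]]) [[]] := by
    rw [foldl_push_groupsR _ [[]] (by simp)]
    cases hg : groupsR ((List.range MAXX).map (colChars body)) with
    | nil => exact absurd hg (groupsR_ne_nil _)
    | cons g0 gsr => simp
  rw [hgroups]
  -- A's enumerate summation = the same zip-filter-map sum
  have hcond : ∀ i, i < ops.length →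
      (ops.getD i [] = ['*'] ∨ ops.getD i [] = ['+']) →
      0 + i < (((List.range MAXX).map (colChars body)).foldl
        (fun gs c => if c ≠ [] then pushLast gs ((PySem.Int.ofChars? c).getD 0) else gs ++ [[]])
        [[]]).length := by
    intro i hi hop
    rw [groupLen _ [[]] (by simp), List.countP_map]
    have := hops i hi hop
    simp only [List.length_cons, List.length_nil, Function.comp_def] at *
    omega
  have hs := sumEq _ ops 0 0 hcond
  rw [Nat.cast_zero, List.drop_zero, zero_add] at hs
  rw [hs, List.drop_zero]
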